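-- pv_equiv track=rewrite | github.com/Hernandezjose2000/PRIMER_PARCIAL | 107411 - Hernandz, Jose - E4.py | obteniendo_y_operando_numeros
-- ===== SOURCE A (Python) =====
-- def obteniendo_y_operando_numeros(numeros:str) ->tuple:
--
--     lista_numeros_enteros = list()
--     lista_nueva = numeros.split()
--
--     for numero in lista_nueva:
--         lista_numeros_enteros.append(int(numero))
--
--     numero_maximo = max(lista_numeros_enteros)
--     numero_minimo = min(lista_numeros_enteros)
--     sumatoria_total_numeros = sum(lista_numeros_enteros)
--
--     return (numero_maximo, numero_minimo, sumatoria_total_numeros)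
-- ===== SOURCE B (Python) =====
-- def obteniendo_y_operando_numeros(numeros: str) -> tuple:
--     maximo = minimo = suma = None
--     for token in numeros.split():
--         valor = int(token)
--         if maximo is None:
--             maximo = minimo = suma = valor
--         else:
--             if valor > maximo:
--                 maximo = valor
--             if valor < minimo:
--                 minimo = valor
--             suma += valor
--     if maximo is None:
--         raise ValueError("max() arg is an empty sequence")
--     return (maximo, minimo, suma)
-- ===== Notes on version B (the rewrite author's own statement) =====
-- stated objective: faster
-- what changed: B makes one pass over the tokens maintaining running max/min/sum accumulators instead of materialising the full int list and scanning it three more times with max()/min()/sum().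
import Mathlib
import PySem

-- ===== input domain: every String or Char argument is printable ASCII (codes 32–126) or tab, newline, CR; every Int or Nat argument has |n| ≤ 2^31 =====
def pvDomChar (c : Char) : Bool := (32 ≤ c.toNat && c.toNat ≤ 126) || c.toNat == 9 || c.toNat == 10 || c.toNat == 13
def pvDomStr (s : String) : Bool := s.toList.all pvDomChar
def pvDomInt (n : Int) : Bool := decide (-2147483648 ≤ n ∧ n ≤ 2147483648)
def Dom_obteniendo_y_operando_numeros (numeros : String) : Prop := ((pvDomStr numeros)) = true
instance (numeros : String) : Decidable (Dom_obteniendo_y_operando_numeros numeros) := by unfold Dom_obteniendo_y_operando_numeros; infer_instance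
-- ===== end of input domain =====

-- B replaces A's build-a-list-then-scan-three-times with a single accumulator pass (constant-factor speedup).

-- ===== PORT A =====
-- A: build the int list with a loop of appends, then take max, min, sum of it.
def obteniendo_y_operando_numeros (numeros : String) : Int × Int × Int :=
  let lista_nueva := PySem.Str.split₀ numeros
  let lista_numeros_enteros :=
    lista_nueva.foldl (fun acc numero => acc ++ [(PySem.Int.ofStr? numero).getD 0]) []
  match PySem.List.max? lista_numeros_enteros (fun x => x),
        PySem.List.min? lista_numeros_enteros (fun x => x) with
  | some numero_maximo, some numero_minimo =>
      (numero_maximo, numero_minimo, lista_numeros_enteros.foldl (· + ·) 0)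
  | _, _ => (0, 0, 0)   -- unreachable under Pre_ (max([]) raises ValueError)

-- ===== PORT B =====
-- B: one pass with running max/min/sum accumulators.
def pvBLoop (tokens : List String) (maximo minimo suma : Int) : Int × Int × Int :=
  match tokens with
  | [] => (maximo, minimo, suma)
  | token :: rest =>
      let valor := (PySem.Int.ofStr? token).getD 0
      pvBLoop rest (if valor > maximo then valor else maximo)
                   (if valor < minimo then valor else minimo)
                   (suma + valor)

def obteniendo_y_operando_numeros_alt (numeros : String) : Int × Int × Int :=
  match PySem.Str.split₀ numeros with
  | [] => (0, 0, 0)   -- B raises ValueError here, outside Pre_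
  | token :: rest =>
      let valor := (PySem.Int.ofStr? token).getD 0
      pvBLoop rest valor valor valor

-- ===== PRECONDITION & SPEC =====
-- Pre_: the string has at least one whitespace-separated token and every token parses as a
-- Python int — otherwise A raises (ValueError from int() or from max([])).
def Pre_obteniendo_y_operando_numeros (numeros : String) : Prop :=
  PySem.Str.split₀ numeros ≠ [] ∧
  ∀ t ∈ PySem.Str.split₀ numeros, (PySem.Int.ofStr? t).isSome
instance (numeros : String) : Decidable (Pre_obteniendo_y_operando_numeros numeros) := by
  unfold Pre_obteniendo_y_operando_numeros; infer_instance
def pvWitness_obteniendo_y_operando_numeros : String := " 7 +5  -3 "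

def Spec_obteniendo_y_operando_numeros (numeros : String) (out : Int × Int × Int) : Prop :=
  out = obteniendo_y_operando_numeros_alt numeros
instance (numeros : String) (out : Int × Int × Int) : Decidable (Spec_obteniendo_y_operando_numeros numeros out) := by
  unfold Spec_obteniendo_y_operando_numeros; infer_instance

-- ===== CLAIM (what is proved, stated in full; the proofs are below) =====
def Claim_equal_obteniendo_y_operando_numeros : Prop :=
  ∀ (numeros : String), Dom_obteniendo_y_operando_numeros numeros →
    Pre_obteniendo_y_operando_numeros numeros →
    Spec_obteniendo_y_operando_numeros numeros (obteniendo_y_operando_numeros numeros)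

-- ===== LEMMAS AND PROOFS =====

theorem pvFoldlAppendMap (f : String → Int) (l : List String) (acc : List Int) :
    l.foldl (fun a t => a ++ [f t]) acc = acc ++ l.map f := by
  induction l generalizing acc with
  | nil => simp
  | cons h t ih => simp [List.foldl, ih]

theorem pvBLoopEq (l : List String) (mx mn s : Int) :
    pvBLoop l mx mn s =
      ((l.map fun t => (PySem.Int.ofStr? t).getD 0).foldl max mx,
       (l.map fun t => (PySem.Int.ofStr? t).getD 0).foldl min mn,
       (l.map fun t => (PySem.Int.ofStr? t).getD 0).foldl (· + ·) s) := by
  induction l generalizing mx mn s with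
  | nil => simp [pvBLoop]
  | cons h t ih =>
      have h1 : (if (PySem.Int.ofStr? h).getD 0 > mx then (PySem.Int.ofStr? h).getD 0 else mx)
          = max mx ((PySem.Int.ofStr? h).getD 0) := by omega
      have h2 : (if (PySem.Int.ofStr? h).getD 0 < mn then (PySem.Int.ofStr? h).getD 0 else mn)
          = min mn ((PySem.Int.ofStr? h).getD 0) := by omega
      simp only [pvBLoop, List.map_cons, List.foldl_cons, ih, h1, h2]

theorem obteniendo_spec_aux (numeros : String) :
    Pre_obteniendo_y_operando_numeros numeros →
    obteniendo_y_operando_numeros numeros = obteniendo_y_operando_numeros_alt numeros := by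
  intro hpre
  unfold obteniendo_y_operando_numeros obteniendo_y_operando_numeros_alt
  obtain ⟨hne, _⟩ := hpre
  cases h : PySem.Str.split₀ numeros with
  | nil => exact absurd h hne
  | cons tok rest =>
      have hflat : ∀ (l : List String),
          (l.map (fun x => [(PySem.Int.ofStr? x).getD 0])).flatten
            = l.map (fun t => (PySem.Int.ofStr? t).getD 0) := by
        intro l; induction l with
        | nil => rfl
        | cons a t ih => simp [ih]
      simp [pvFoldlAppendMap, PySem.List.max?_id_cons, PySem.List.min?_id_cons, pvBLoopEq, hflat]

-- ===== VERDICT (by name: the statement is the Claim_ definition above) =====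
theorem obteniendo_y_operando_numeros_spec : Claim_equal_obteniendo_y_operando_numeros := by
  intro numeros _ hpre
  exact obteniendo_spec_aux numeros hpre
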